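-- pv_equiv track=rewrite | github.com/alicialeb/transformation_of_ui_logs_into_oc_event_data | functions.py | determine_hierarchy_level
-- ===== SOURCE A (Python) =====
-- def determine_hierarchy_level(object_type, object_hierarchy):
--     """
--     Determines the object type hierarchy level of an input object type.
--
--     :param object_type: A UI object type.
--     :param object_hierarchy: A dictionary specifying the typical ui object hierarchy.
--     :return: A string indicating one of four hierarchy levels ('obj_highest_level', 'obj_second_level',
--                 'obj_third_level', 'obj_fourth_level').
--     """
--     obj_level = None
--
--     # check to which hierarchy level the object type belongs
--     for level, obj_values in object_hierarchy.items():
--         if object_type in obj_values: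
--             obj_level = level
--
--     # if no level can be assigned, assign the lowest level
--     if obj_level is None:
--         obj_level = 'obj_fourth_level'
--
--     return obj_level
-- ===== SOURCE B (Python) =====
-- def determine_hierarchy_level(object_type, object_hierarchy):
--     """Reverse-index build: one dict mapping element -> level, then a single lookup."""
--     reverse = {}
--     for level, obj_values in object_hierarchy.items():
--         for element in obj_values:
--             reverse[element] = level
--     return reverse.get(object_type, 'obj_fourth_level')
-- ===== Notes on version B (the rewrite author's own statement) =====
-- stated objective: alternative
-- what changed: Replaces per-level membership scans with last-match bookkeeping by building a reverse element->level dictionary in one pass and doing a single lookup with default; dict overwrite preserves A's last-match-wins.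
import Mathlib
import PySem

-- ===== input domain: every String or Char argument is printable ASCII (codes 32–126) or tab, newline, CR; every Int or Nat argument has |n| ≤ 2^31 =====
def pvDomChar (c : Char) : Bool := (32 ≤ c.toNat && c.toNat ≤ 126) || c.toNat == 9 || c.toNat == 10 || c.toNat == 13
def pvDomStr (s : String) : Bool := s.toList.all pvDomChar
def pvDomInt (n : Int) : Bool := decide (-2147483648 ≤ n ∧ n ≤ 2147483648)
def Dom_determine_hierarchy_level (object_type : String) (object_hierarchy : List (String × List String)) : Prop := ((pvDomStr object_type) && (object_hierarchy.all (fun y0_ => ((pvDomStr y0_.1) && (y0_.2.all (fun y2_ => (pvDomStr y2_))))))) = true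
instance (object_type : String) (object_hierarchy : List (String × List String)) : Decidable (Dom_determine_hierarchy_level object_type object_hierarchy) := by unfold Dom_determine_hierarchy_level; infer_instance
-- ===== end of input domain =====

-- B replaces A's per-level membership scans (last match wins) by building a reverse
-- element->level dictionary once and doing a single lookup with default (objective: alternative).

-- ===== PORT A =====
-- for level, obj_values in object_hierarchy.items(): if object_type in obj_values: obj_level = level
def determine_hierarchy_level (object_type : String) (object_hierarchy : List (String × List String)) : String :=
  let obj_level : Option String :=
    object_hierarchy.foldl
      (fun acc p => if object_type ∈ p.2 then some p.1 else acc) none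
  match obj_level with
  | none => "obj_fourth_level"
  | some l => l

-- ===== PORT B =====
-- reverse = {}; for level, obj_values: for element in obj_values: reverse[element] = level;
-- return reverse.get(object_type, 'obj_fourth_level')
def determine_hierarchy_level_alt (object_type : String) (object_hierarchy : List (String × List String)) : String :=
  let reverse : PySem.Dict String String :=
    object_hierarchy.foldl
      (fun d p => p.2.foldl (fun d e => d.insert e p.1) d) PySem.Dict.empty
  reverse.getD object_type "obj_fourth_level"

-- ===== PRECONDITION & SPEC =====
def Spec_determine_hierarchy_level (object_type : String) (object_hierarchy : List (String × List String)) (out : String) : Prop := out = determine_hierarchy_level_alt object_type object_hierarchy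
instance (object_type : String) (object_hierarchy : List (String × List String)) (out : String) : Decidable (Spec_determine_hierarchy_level object_type object_hierarchy out) := by unfold Spec_determine_hierarchy_level; infer_instance

-- ===== CLAIM (what is proved, stated in full; the proofs are below) =====
def Claim_equal_determine_hierarchy_level : Prop := ∀ (object_type : String) (object_hierarchy : List (String × List String)), Dom_determine_hierarchy_level object_type object_hierarchy → Spec_determine_hierarchy_level object_type object_hierarchy (determine_hierarchy_level object_type object_hierarchy)

-- ===== LEMMAS AND PROOFS =====

-- Inserting every element of vs with value l: the lookup of ot becomes l iff ot ∈ vs.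
theorem dhl_inner (ot l : String) (vs : List String) (d : PySem.Dict String String) :
    (vs.foldl (fun d e => d.insert e l) d).get? ot
      = if ot ∈ vs then some l else d.get? ot := by
  induction vs generalizing d with
  | nil => simp
  | cons v rest ih =>
    simp only [List.foldl_cons, ih, PySem.Dict.get?_insert, List.mem_cons]
    by_cases h1 : ot ∈ rest <;> by_cases h2 : ot = v <;> simp [h1, h2]

-- The reverse-dict build, looked up at ot, equals A's fold with accumulator d.get? ot.
theorem dhl_outer (ot : String) (hs : List (String × List String)) (d : PySem.Dict String String) :
    (hs.foldl (fun d p => p.2.foldl (fun d e => d.insert e p.1) d) d).get? ot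
      = hs.foldl (fun acc p => if ot ∈ p.2 then some p.1 else acc) (d.get? ot) := by
  induction hs generalizing d with
  | nil => rfl
  | cons h rest ih =>
    simp only [List.foldl_cons, ih, dhl_inner]

-- ===== VERDICT (by name: the statement is the Claim_ definition above) =====
theorem determine_hierarchy_level_spec : Claim_equal_determine_hierarchy_level := by
  intro ot hs _
  unfold Spec_determine_hierarchy_level determine_hierarchy_level determine_hierarchy_level_alt
  rw [PySem.Dict.getD_eq_get?_getD, dhl_outer]
  simp only [PySem.Dict.get?_empty]
  cases hfold : hs.foldl (fun acc p => if ot ∈ p.2 then some p.1 else acc) none <;> rfl
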